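-- pv_equiv track=rewrite | github.com/dudamarlena/pyc_source | pycfiles/golismero-2.0.3-1.tar/glob.py | valid_glob
-- ===== SOURCE A (Python) =====
-- def valid_glob(ipglob):
--     """
--     :param ipglob: An IP address range in a glob-style format.
--
--     :return: ``True`` if IP range glob is valid, ``False`` otherwise.
--     """
--     if not hasattr(ipglob, 'split'):
--         return False
--     seen_hyphen = False
--     seen_asterisk = False
--     octets = ipglob.split('.')
--     if len(octets) != 4:
--         return False
--     for octet in octets:
--         if '-' in octet:
--             if seen_hyphen:
--                 return False
--             seen_hyphen = True
--             if seen_asterisk: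
--                 return False
--             try:
--                 octet1, octet2 = [ int(i) for i in octet.split('-') ]
--             except ValueError:
--                 return False
--
--             if octet1 >= octet2:
--                 return False
--             if not 0 <= octet1 <= 254:
--                 return False
--             if not 1 <= octet2 <= 255:
--                 return False
--         elif octet == '*':
--             seen_asterisk = True
--         else:
--             if seen_hyphen is True:
--                 return False
--             if seen_asterisk is True:
--                 return False
--             try:
--                 if not 0 <= int(octet) <= 255:
--                     return False
--             except ValueError:
--                 return False
--
--     return True
-- ===== SOURCE B (Python) =====
-- NUM, RANGE, STAR, INVALID = 0, 1, 2, 3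
--
-- def _classify(octet):
--     if '-' in octet:
--         parts = octet.split('-')
--         if len(parts) != 2:
--             return INVALID
--         try:
--             a, b = int(parts[0]), int(parts[1])
--         except ValueError:
--             return INVALID
--         return RANGE if (0 <= a <= 254 and 1 <= b <= 255 and a < b) else INVALID
--     if octet == '*':
--         return STAR
--     try:
--         return NUM if 0 <= int(octet) <= 255 else INVALID
--     except ValueError:
--         return INVALID
--
-- def valid_glob(ipglob):
--     if not hasattr(ipglob, 'split'):
--         return False
--     octets = ipglob.split('.')
--     if len(octets) != 4:
--         return False
--     kinds = [_classify(o) for o in octets]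
--     # ordering: numbers, then at most one range, then asterisks (NUM* RANGE? STAR*)
--     i = 0
--     while i < 4 and kinds[i] == NUM:
--         i += 1
--     if i < 4 and kinds[i] == RANGE:
--         i += 1
--     while i < 4 and kinds[i] == STAR:
--         i += 1
--     return i == 4
-- ===== Notes on version B (the rewrite author's own statement) =====
-- stated objective: alternative
-- what changed: A validates in one stateful pass with seen_hyphen/seen_asterisk flags and early returns; B first classifies each octet independently (NUM/RANGE/STAR/INVALID) and then checks the ordering NUM* RANGE? STAR* with a separate pointer walk.
import Mathlib
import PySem

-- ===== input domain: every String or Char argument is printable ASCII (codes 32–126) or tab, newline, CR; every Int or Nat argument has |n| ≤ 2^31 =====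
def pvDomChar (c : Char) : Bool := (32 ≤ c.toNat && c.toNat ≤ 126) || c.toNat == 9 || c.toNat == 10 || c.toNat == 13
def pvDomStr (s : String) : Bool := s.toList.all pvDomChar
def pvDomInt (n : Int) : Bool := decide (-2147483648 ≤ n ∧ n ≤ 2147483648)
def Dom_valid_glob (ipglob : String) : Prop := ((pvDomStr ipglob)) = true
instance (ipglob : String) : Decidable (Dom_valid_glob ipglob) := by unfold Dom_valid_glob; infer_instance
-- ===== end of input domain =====

-- B replaces A's single stateful pass (seen_hyphen/seen_asterisk flags) by a per-octet
-- classification pass followed by a separate ordering check (NUM* RANGE? STAR*); alternative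
-- decomposition, same cost.

-- ===== PORT A =====
-- [int(i) for i in octet.split('-')]; none = ValueError from int()
def intsA : List String → Option (List Int)
  | [] => some []
  | s :: t =>
    match PySem.Int.ofStr? s, intsA t with
    | some n, some ns => some (n :: ns)
    | _, _ => none

-- the for-loop over octets with the two flags; early returns become false
def vgLoopA : List String → Bool → Bool → Bool
  | [], _, _ => true
  | o :: rest, seen_hyphen, seen_asterisk =>
    if PySem.Str.isIn "-" o then
      if seen_hyphen then false
      else if seen_asterisk then false
      else
        -- unpack 'octet1, octet2 = [...]': arity ≠ 2 is also a caught ValueError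
        match intsA ((PySem.Str.split? o "-").getD []) with
        | some [octet1, octet2] =>
          if octet1 ≥ octet2 then false
          else if ¬ (0 ≤ octet1 ∧ octet1 ≤ 254) then false
          else if ¬ (1 ≤ octet2 ∧ octet2 ≤ 255) then false
          else vgLoopA rest true seen_asterisk
        | _ => false
    else if o == "*" then vgLoopA rest seen_hyphen true
    else
      if seen_hyphen then false
      else if seen_asterisk then false
      else
        match PySem.Int.ofStr? o with
        | some n => if ¬ (0 ≤ n ∧ n ≤ 255) then false else vgLoopA rest seen_hyphen seen_asterisk
        | none => false

def valid_glob (ipglob : String) : Bool :=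
  let octets := (PySem.Str.split? ipglob ".").getD []
  if octets.length ≠ 4 then false
  else vgLoopA octets false false

-- ===== PORT B =====
inductive OctKind where
  | num | rng | star | inval
deriving DecidableEq, Repr

def classifyOct (o : String) : OctKind :=
  if PySem.Str.isIn "-" o then
    match (PySem.Str.split? o "-").getD [] with
    | [p, q] =>
      match PySem.Int.ofStr? p, PySem.Int.ofStr? q with
      | some a, some b =>
        if 0 ≤ a ∧ a ≤ 254 ∧ 1 ≤ b ∧ b ≤ 255 ∧ a < b then .rng else .inval
      | _, _ => .inval
    | _ => .inval
  else if o == "*" then .star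
  else
    match PySem.Int.ofStr? o with
    | some n => if 0 ≤ n ∧ n ≤ 255 then .num else .inval
    | none => .inval

-- ordering check NUM* RANGE? STAR* (the three pointer walks of Source B as drops)
def orderOk (ks : List OctKind) : Bool :=
  let ks1 := ks.dropWhile (· == OctKind.num)
  let ks2 := match ks1 with
    | OctKind.rng :: t => t
    | l => l
  (ks2.dropWhile (· == OctKind.star)).isEmpty

def valid_glob_alt (ipglob : String) : Bool :=
  let octets := (PySem.Str.split? ipglob ".").getD []
  if octets.length ≠ 4 then false
  else orderOk (octets.map classifyOct)

-- ===== PRECONDITION & SPEC =====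
def Spec_valid_glob (ipglob : String) (out : Bool) : Prop := out = valid_glob_alt ipglob
instance (ipglob : String) (out : Bool) : Decidable (Spec_valid_glob ipglob out) := by unfold Spec_valid_glob; infer_instance

-- ===== CLAIM (what is proved, stated in full; the proofs are below) =====
def Claim_equal_valid_glob : Prop := ∀ (ipglob : String), Dom_valid_glob ipglob → Spec_valid_glob ipglob (valid_glob ipglob)

-- ===== LEMMAS AND PROOFS =====

theorem beq_octkind (a b : OctKind) : (a == b) = decide (a = b) := by
  cases a <;> cases b <;> decide

-- an octet containing '-' never classifies as a plain number or an asterisk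
theorem classify_hyphen (o : String) (hin : PySem.Str.isIn "-" o = true) :
    classifyOct o = OctKind.rng ∨ classifyOct o = OctKind.inval := by
  simp only [classifyOct, hin, if_true]
  repeat' first
  | exact Or.inl rfl
  | exact Or.inr rfl
  | split

-- A's loop step expressed through B's per-octet classification
theorem vgLoopA_step (o : String) (rest : List String) (sh sa : Bool) :
    vgLoopA (o :: rest) sh sa =
      match classifyOct o with
      | .num => if sh || sa then false else vgLoopA rest sh sa
      | .rng => if sh || sa then false else vgLoopA rest true sa
      | .star => vgLoopA rest sh true
      | .inval => false := by
  by_cases hin : PySem.Str.isIn "-" o = true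
  · rcases hflag : sh || sa with _ | _
    · -- both flags false: the parse content matters
      have hsh : sh = false := by cases sh <;> simp_all
      have hsa : sa = false := by cases sa <;> simp_all
      subst hsh hsa
      simp only [vgLoopA, classifyOct, hin, if_true, Bool.false_eq_true, if_false]
      rcases (PySem.Str.split? o "-").getD [] with _ | ⟨p, _ | ⟨q, t⟩⟩
      · simp [intsA]
      · cases hp : PySem.Int.ofStr? p <;> simp [intsA, hp]
      · cases t with
        | nil =>
          cases hp : PySem.Int.ofStr? p <;> cases hq : PySem.Int.ofStr? q <;>
            simp only [intsA, hp, hq] <;> try simp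
          rename_i a b
          by_cases h1 : a < b <;> by_cases h2 : 0 ≤ a <;> by_cases h3 : a ≤ 254 <;>
            by_cases h4 : 1 ≤ b <;> by_cases h5 : b ≤ 255 <;>
            simp [h1, h2, h3, h4, h5] <;>
            first
            | rfl | omega | (exfalso; omega)
            | (have e1 : ¬ (b ≤ a) := by omega
               have e2 : ¬ (254 < a) := by omega
               have e3 : ¬ (255 < b) := by omega
               simp [e1, e2, e3])
        | cons r t' =>
          cases hp : PySem.Int.ofStr? p <;> cases hq : PySem.Int.ofStr? q <;>
            cases hr : PySem.Int.ofStr? r <;>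
            simp only [intsA, hp, hq, hr] <;> try simp
          cases intsA t' <;> simp
    · -- a flag is set: A returns False at once; B's kind is rng or inval, both map to false
      rcases classify_hyphen o hin with hc | hc <;>
        simp only [vgLoopA, hin, if_true, hc, hflag] <;>
        cases sh <;> cases sa <;> simp_all
  · simp only [Bool.not_eq_true] at hin
    by_cases hstar : o = "*"
    · subst hstar
      have h : PySem.Chars.isIn ['-'] ['*'] = false := by decide
      simp [vgLoopA, classifyOct, h]
    · have hne : (o == "*") = false := by simp [hstar]
      simp only [vgLoopA, classifyOct, hin, Bool.false_eq_true, if_false, hne]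
      cases hn : PySem.Int.ofStr? o
      · cases sh <;> cases sa <;> simp
      · rename_i n
        by_cases hb : 0 ≤ n ∧ n ≤ 255 <;> cases sh <;> cases sa <;> simp [hb]

theorem dropWhile_star_isEmpty (ks : List OctKind) :
    (ks.dropWhile (fun x => decide (x = OctKind.star))).isEmpty
      = ks.all (fun x => decide (x = OctKind.star)) := by
  induction ks with
  | nil => rfl
  | cons k t ih => cases k <;> simp [List.dropWhile, ih]

theorem vgLoopA_eq (l : List String) :
    ∀ sh sa : Bool,
      vgLoopA l sh sa =
        if sh || sa then (l.map classifyOct).all (· == OctKind.star)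
        else orderOk (l.map classifyOct) := by
  induction l with
  | nil => intro sh sa; cases sh <;> cases sa <;> simp [vgLoopA, orderOk]
  | cons o rest ih =>
    intro sh sa
    rw [vgLoopA_step]
    cases hc : classifyOct o with
    | num =>
      cases sh <;> cases sa <;> simp [ih, orderOk, List.dropWhile, beq_octkind, hc]
    | rng =>
      cases sh <;> cases sa <;>
        simp [ih, orderOk, List.dropWhile, dropWhile_star_isEmpty, beq_octkind, hc]
    | star =>
      cases sh <;> cases sa <;>
        simp [ih, orderOk, List.dropWhile, dropWhile_star_isEmpty, beq_octkind, hc]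
    | inval =>
      cases sh <;> cases sa <;> simp [orderOk, List.dropWhile, beq_octkind, hc]

-- ===== VERDICT (by name: the statement is the Claim_ definition above) =====
theorem valid_glob_spec : Claim_equal_valid_glob := by
  intro ipglob _
  unfold Spec_valid_glob valid_glob valid_glob_alt
  by_cases h : ((PySem.Str.split? ipglob ".").getD []).length ≠ 4
  · simp [h]
  · simp [h, vgLoopA_eq]
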